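-- pv_equiv track=rewrite | github.com/shi0524/algorithmbasic2020 | Python2/class25/Code02_AllTimesMinToMax.py | sub_max
-- ===== SOURCE A (Python) =====
-- def sub_max(arr):
--     """ 前缀和数组 求sum
--         单调栈
--     """
--
--     # 前缀和数组
--     pre_sum = [arr[0]]
--     for num in arr[1:]:
--         pre_sum.append(pre_sum[-1] + num)
--
--     # 求每个元素左右两边比自己大的元素左边位置
--     ans = 0
--     n = len(arr)
--     stack = []
--     stackk = []
--     for i, num in enumerate(arr):
--         while stack and arr[stack[-1]] >= num:
--             pos = stack.pop()
--             stackk.pop()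
--             right = i - 1
--             left = stack[-1] + 1 if stack else 0
--             sub_sum = pre_sum[right] - pre_sum[left - 1] if left else pre_sum[right]
--             ans = max(ans, sub_sum * arr[pos])
--         stack.append(i)
--         stackk.append(arr[i])
--     while stack:
--         pos = stack.pop()
--         stackk.pop()
--         right = n - 1
--         left = stack[-1] + 1 if stack else 0
--         sub_sum = pre_sum[right] - pre_sum[left - 1] if left else pre_sum[right]
--         ans = max(ans, sub_sum * arr[pos])
--
--     return ans
-- ===== SOURCE B (Python) =====
-- def sub_max(arr):
--     n = len(arr)
--     pre = []
--     s = 0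
--     for x in arr:
--         s += x
--         pre.append(s)
--     lefts = []
--     st = []
--     for i in range(n):
--         while st and arr[st[-1]] >= arr[i]:
--             st.pop()
--         lefts.append(st[-1] if st else -1)
--         st.append(i)
--     rights = []
--     st = []
--     for i in range(n - 1, -1, -1):
--         while st and arr[st[-1]] > arr[i]:
--             st.pop()
--         rights.append(st[-1] if st else n)
--         st.append(i)
--     rights.reverse()
--     ans = 0
--     for i in range(n):
--         l = lefts[i]
--         r = rights[i]
--         sub = pre[r - 1] - (pre[l] if l >= 0 else 0)
--         ans = max(ans, sub * arr[i])
--     return ans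
-- ===== Notes on version B (the rewrite author's own statement) =====
-- stated objective: alternative
-- what changed: Replaces the interleaved pop-time answer updates on one shared stack by a clean decomposition: two separate monotonic-stack passes precompute nearest-smaller boundary arrays (strictly-less on the left, less-or-equal on the right), then one flat pass combines them with prefix sums; same O(n) cost.
import Mathlib
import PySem

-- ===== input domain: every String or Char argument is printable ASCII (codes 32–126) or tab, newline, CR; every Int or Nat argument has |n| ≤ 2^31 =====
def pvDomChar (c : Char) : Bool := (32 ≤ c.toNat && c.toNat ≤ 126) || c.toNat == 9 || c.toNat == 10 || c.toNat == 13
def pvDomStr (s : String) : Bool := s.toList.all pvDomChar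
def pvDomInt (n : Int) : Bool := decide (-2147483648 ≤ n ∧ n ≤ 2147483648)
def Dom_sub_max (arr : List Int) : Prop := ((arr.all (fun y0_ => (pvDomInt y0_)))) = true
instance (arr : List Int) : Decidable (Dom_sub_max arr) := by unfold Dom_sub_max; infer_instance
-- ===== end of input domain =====

-- B replaces A's single stack with interleaved pop-time answer updates by two separate
-- monotonic-stack boundary passes plus one flat combining pass (objective: alternative, same O(n)).

-- all list indices used by either program are in range on Pre_, so getD is exact there
def pvGet (xs : List Int) (i : Nat) : Int := xs.getD i 0

-- ===== PORT A =====
-- the prefix-sum loop: seeded with the first element, then appending the running sum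
-- (Python raises IndexError on the empty list; outside Pre_ we return the empty list)
def preSumA (arr : List Int) : List Int :=
  match arr with
  | [] => []
  | x :: rest => rest.foldl (fun ps num => ps ++ [ps.getLastD 0 + num]) [x]

-- the inner 'while stack and arr[stack[-1]] >= num' loop of the main for-loop;
-- stack is top-first; 'left = stack[-1]+1 if stack else 0' and 'if left' merge into the match
-- (left = j+1 ≠ 0 exactly when the remaining stack is nonempty), 'pre_sum[left-1]' = pre.getD j
def popStepA (arr pre : List Int) (i : Nat) (num : Int) : Int → List Nat → Int × List Nat
  | ans, [] => (ans, [])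
  | ans, pos :: rest =>
    if num ≤ pvGet arr pos then
      let right : Nat := i - 1
      let sub : Int :=
        match rest with
        | [] => pre.getD right 0
        | j :: _ => pre.getD right 0 - pre.getD j 0
      popStepA arr pre i num (max ans (sub * pvGet arr pos)) rest
    else (ans, pos :: rest)

-- the trailing 'while stack:' loop
def finishA (arr pre : List Int) (n : Nat) : Int → List Nat → Int
  | ans, [] => ans
  | ans, pos :: rest =>
    let right : Nat := n - 1
    let sub : Int :=
      match rest with
      | [] => pre.getD right 0
      | j :: _ => pre.getD right 0 - pre.getD j 0
    finishA arr pre n (max ans (sub * pvGet arr pos)) rest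

-- 'stackk' in the Python mirrors 'stack' and is never read; it is omitted
def sub_max (arr : List Int) : Int :=
  let pre := preSumA arr
  let n := arr.length
  let st := (List.range n).foldl (fun (st : Int × List Nat) i =>
      let r := popStepA arr pre i (pvGet arr i) st.1 st.2
      (r.1, i :: r.2)) (0, [])
  finishA arr pre n st.1 st.2

-- ===== PORT B =====
-- 'while st and arr[st[-1]] >= arr[i]: st.pop()'
def popGE (arr : List Int) (v : Int) : List Nat → List Nat
  | [] => []
  | j :: rest => if v ≤ pvGet arr j then popGE arr v rest else j :: rest

-- 'while st and arr[st[-1]] > arr[i]: st.pop()'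
def popGT (arr : List Int) (v : Int) : List Nat → List Nat
  | [] => []
  | j :: rest => if v < pvGet arr j then popGT arr v rest else j :: rest

-- pre = []; s = 0; for x in arr: s += x; pre.append(s)
def preSumB (arr : List Int) : List Int :=
  (arr.foldl (fun (p : List Int × Int) x => (p.1 ++ [p.2 + x], p.2 + x)) ([], 0)).1

-- lefts.append(st[-1] if st else -1); st.append(i)
def leftsB (arr : List Int) (n : Nat) : List Int :=
  ((List.range n).foldl (fun (p : List Int × List Nat) i =>
      let st := popGE arr (pvGet arr i) p.2
      (p.1 ++ [match st with | [] => (-1 : Int) | j :: _ => (j : Int)], i :: st)) ([], [])).1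

-- for i in range(n-1,-1,-1): …; rights.reverse()
def rightsB (arr : List Int) (n : Nat) : List Int :=
  (((List.range n).reverse.foldl (fun (p : List Int × List Nat) i =>
      let st := popGT arr (pvGet arr i) p.2
      (p.1 ++ [match st with | [] => (n : Int) | j :: _ => (j : Int)], i :: st)) ([], [])).1).reverse

def sub_max_alt (arr : List Int) : Int :=
  let n := arr.length
  let pre := preSumB arr
  let lefts := leftsB arr n
  let rights := rightsB arr n
  (List.range n).foldl (fun ans i =>
      let l := lefts.getD i 0
      let r := rights.getD i 0
      let sub := pre.getD (r - 1).toNat 0 - (if 0 ≤ l then pre.getD l.toNat 0 else 0)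
      max ans (sub * pvGet arr i)) 0

-- ===== PRECONDITION & SPEC =====
-- Python A builds its prefix-sum list starting from the first element and so raises IndexError
-- on the empty list; B naturally returns 0 there.
def Pre_sub_max (arr : List Int) : Prop := arr ≠ []
instance (arr : List Int) : Decidable (Pre_sub_max arr) := by unfold Pre_sub_max; infer_instance
def pvWitness_sub_max : List Int := ([3, 1, -2, 4] : List Int)

def Spec_sub_max (arr : List Int) (out : Int) : Prop := out = sub_max_alt arr
instance (arr : List Int) (out : Int) : Decidable (Spec_sub_max arr out) := by unfold Spec_sub_max; infer_instance

-- ===== CLAIM (what is proved, stated in full; the proofs are below) =====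
def Claim_equal_sub_max : Prop := ∀ (arr : List Int), Dom_sub_max arr → Pre_sub_max arr → Spec_sub_max arr (sub_max arr)

-- ===== LEMMAS AND PROOFS =====

-- ---- specification-level quantities ----

-- survB arr i j: j survives in the (left) stack after the first i elements were processed:
-- every k strictly between j and i carries a strictly larger value
def survB (arr : List Int) (i j : Nat) : Bool :=
  (List.range' (j+1) (i - (j+1))).all (fun k => decide (pvGet arr j < pvGet arr k))

def stkSpec (arr : List Int) (i : Nat) : List Nat :=
  ((List.range i).filter (survB arr i)).reverse

-- survRB arr i j: j survives in the right-to-left stack once indices n-1 … i were processed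
def survRB (arr : List Int) (i j : Nat) : Bool :=
  (List.range' i (j - i)).all (fun k => decide (pvGet arr j ≤ pvGet arr k))

-- first index ≥ j (within fuel) whose value is ≤ v, else j+fuel
def RbAux (arr : List Int) (v : Int) : Nat → Nat → Nat
  | j, 0 => j
  | j, fuel+1 => if pvGet arr j ≤ v then j else RbAux arr v (j+1) fuel

def RbSpec (arr : List Int) (p : Nat) : Nat := RbAux arr (pvGet arr p) (p+1) (arr.length - (p+1))

-- last index < p with value < v
def lastLt (arr : List Int) (v : Int) : Nat → Option Nat
  | 0 => none
  | j+1 => if pvGet arr j < v then some j else lastLt arr v j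

def LbSpec (arr : List Int) (p : Nat) : Option Nat := lastLt arr (pvGet arr p) p

def S (arr : List Int) (k : Nat) : Int := (arr.take k).sum

def fI (arr : List Int) (p : Nat) : Int :=
  (S arr (RbSpec arr p) - (match LbSpec arr p with | none => 0 | some j => S arr (j+1))) * pvGet arr p

def maxOf (arr : List Int) (a : Int) (l : List Nat) : Int :=
  l.foldl (fun m p => max m (fI arr p)) a

-- prefix-sum list starting from accumulated value s
def psList (s : Int) : List Int → List Int
  | [] => []
  | x :: r => (s+x) :: psList (s+x) r


-- ---- basic characterizations ----

theorem surv_iff (arr : List Int) (i j : Nat) :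
    survB arr i j = true ↔ ∀ k, j < k → k < i → pvGet arr j < pvGet arr k := by
  simp only [survB, List.all_eq_true, List.mem_range'_1, decide_eq_true_eq]
  constructor
  · intro h k h1 h2; exact h k ⟨by omega, by omega⟩
  · intro h k hk; exact h k (by omega) (by omega)

theorem survR_iff (arr : List Int) (i j : Nat) :
    survRB arr i j = true ↔ ∀ k, i ≤ k → k < j → pvGet arr j ≤ pvGet arr k := by
  simp only [survRB, List.all_eq_true, List.mem_range'_1, decide_eq_true_eq]
  constructor
  · intro h k h1 h2; exact h k ⟨by omega, by omega⟩
  · intro h k hk; exact h k (by omega) (by omega)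

theorem surv_succ (arr : List Int) (i j : Nat) (hj : j < i) :
    (survB arr (i+1) j = true) ↔ (survB arr i j = true ∧ pvGet arr j < pvGet arr i) := by
  simp only [surv_iff]
  constructor
  · intro h
    exact ⟨fun k h1 h2 => h k h1 (by omega), h i hj (by omega)⟩
  · rintro ⟨h, hi⟩ k h1 h2
    by_cases hk : k = i
    · subst hk; exact hi
    · exact h k h1 (by omega)

theorem survR_succ (arr : List Int) (i j : Nat) (hj : i < j) :
    (survRB arr i j = true) ↔ (survRB arr (i+1) j = true ∧ pvGet arr j ≤ pvGet arr i) := by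
  simp only [survR_iff]
  constructor
  · intro h
    exact ⟨fun k h1 h2 => h k (by omega) h2, h i (le_refl i) hj⟩
  · rintro ⟨h, hi⟩ k h1 h2
    by_cases hk : k = i
    · subst hk; exact hi
    · exact h k (by omega) h2

theorem surv_self (arr : List Int) (i : Nat) : survB arr (i+1) i = true := by
  rw [surv_iff]; intro k h1 h2; exact absurd h1 (by omega)

theorem survR_self (arr : List Int) (i : Nat) : survRB arr i i = true := by
  rw [survR_iff]; intro k h1 h2; exact absurd h1 (by omega)

-- ---- RbAux characterization ----

theorem rbAux_ge (arr : List Int) (v : Int) :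
    ∀ (fuel j : Nat), j ≤ RbAux arr v j fuel ∧ RbAux arr v j fuel ≤ j + fuel := by
  intro fuel
  induction fuel with
  | zero => intro j; simp [RbAux]
  | succ fuel ih =>
      intro j
      simp only [RbAux]
      split
      · omega
      · have := ih (j+1); omega

theorem rbAux_spec (arr : List Int) (v : Int) :
    ∀ (fuel j : Nat),
      (∀ k, j ≤ k → k < RbAux arr v j fuel → v < pvGet arr k) ∧
      (RbAux arr v j fuel < j + fuel → pvGet arr (RbAux arr v j fuel) ≤ v) := by
  intro fuel
  induction fuel with
  | zero => intro j; simp [RbAux]; intro k h1 h2; omega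
  | succ fuel ih =>
      intro j
      simp only [RbAux]
      split
      · rename_i hle
        refine ⟨fun k h1 h2 => absurd h2 (by omega), fun _ => hle⟩
      · rename_i hgt
        have h1 := (ih (j+1)).1
        have h2 := (ih (j+1)).2
        have hge := rbAux_ge arr v fuel (j+1)
        constructor
        · intro k hk1 hk2
          by_cases hkj : k = j
          · subst hkj; omega
          · exact h1 k (by omega) hk2
        · intro h; exact h2 (by omega)

theorem rbAux_eq_of (arr : List Int) (v : Int) :
    ∀ (fuel j r : Nat), (∀ k, j ≤ k → k < r → v < pvGet arr k) →
      (r < j + fuel → pvGet arr r ≤ v) → j ≤ r → r ≤ j + fuel →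
      RbAux arr v j fuel = r := by
  intro fuel
  induction fuel with
  | zero => intro j r _ _ h3 h4; simp [RbAux]; omega
  | succ fuel ih =>
      intro j r h1 h2 h3 h4
      simp only [RbAux]
      split
      · rename_i hle
        by_contra hne
        have hjr : j < r := by omega
        exact absurd hle (not_le.2 (h1 j (le_refl j) hjr))
      · rename_i hgt
        have hjr : j ≠ r := by
          intro h; subst h; exact hgt (h2 (by omega))
        exact ih (j+1) r (fun k hk1 hk2 => h1 k (by omega) hk2) (fun h => h2 (by omega))
          (by omega) (by omega)

theorem rbSpec_bounds (arr : List Int) (p : Nat) (hp : p < arr.length) :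
    p + 1 ≤ RbSpec arr p ∧ RbSpec arr p ≤ arr.length := by
  have := rbAux_ge arr (pvGet arr p) (arr.length - (p+1)) (p+1)
  unfold RbSpec; omega

theorem rb_of_surv (arr : List Int) (p i : Nat) (hp : p < i) (hin : i < arr.length)
    (hs : survB arr i p = true) (hv : pvGet arr i ≤ pvGet arr p) : RbSpec arr p = i := by
  apply rbAux_eq_of
  · intro k h1 h2; exact (surv_iff arr i p).1 hs k (by omega) h2
  · intro _; exact hv
  · omega
  · omega

theorem rb_of_surv_n (arr : List Int) (p : Nat) (hp : p < arr.length)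
    (hs : survB arr arr.length p = true) : RbSpec arr p = arr.length := by
  apply rbAux_eq_of
  · intro k h1 h2; exact (surv_iff arr arr.length p).1 hs k (by omega) h2
  · intro h; omega
  · omega
  · omega

theorem surv_of_rb (arr : List Int) (p i : Nat) (hp : p < i) (hi : i ≤ arr.length)
    (hr : RbSpec arr p = i) :
    survB arr i p = true ∧ (i < arr.length → pvGet arr i ≤ pvGet arr p) := by
  have h1 := (rbAux_spec arr (pvGet arr p) (arr.length - (p+1)) (p+1)).1
  have h2 := (rbAux_spec arr (pvGet arr p) (arr.length - (p+1)) (p+1)).2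
  rw [show RbAux arr (pvGet arr p) (p+1) (arr.length - (p+1)) = RbSpec arr p from rfl, hr] at h1 h2
  constructor
  · rw [surv_iff]; intro k hk1 hk2; exact h1 k (by omega) hk2
  · intro hlt; exact h2 (by omega)

-- ---- lastLt characterization ----

theorem lastLt_lt (arr : List Int) (v : Int) :
    ∀ (p j : Nat), lastLt arr v p = some j → j < p ∧ pvGet arr j < v := by
  intro p
  induction p with
  | zero => intro j h; simp [lastLt] at h
  | succ p ih =>
      intro j h
      simp only [lastLt] at h
      split at h
      · cases h; constructor; omega; assumption
      · have := ih j h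
        exact ⟨by omega, this.2⟩

-- ---- prefix sums ----

theorem psList_getD (arr : List Int) :
    ∀ (l : List Int) (s : Int) (t : Nat), t < l.length →
      (psList s l).getD t 0 = s + S l (t+1) := by
  intro l
  induction l with
  | nil => intro s t h; simp at h
  | cons x r ih =>
      intro s t h
      cases t with
      | zero => simp [psList, S]
      | succ t =>
          simp only [psList, List.getD_cons_succ]
          rw [ih (s+x) t (by simpa using h)]
          simp [S]
          ring

-- ---- maxOf utilities ----

theorem maxOf_cons (arr : List Int) (a : Int) (x : Nat) (l : List Nat) :
    maxOf arr a (x :: l) = maxOf arr (max a (fI arr x)) l := rfl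

theorem maxOf_append (arr : List Int) (a : Int) (l1 l2 : List Nat) :
    maxOf arr a (l1 ++ l2) = maxOf arr (maxOf arr a l1) l2 := by
  simp [maxOf, List.foldl_append]

theorem maxOf_perm (arr : List Int) {l1 l2 : List Nat} (h : l1.Perm l2) :
    ∀ a, maxOf arr a l1 = maxOf arr a l2 := by
  induction h with
  | nil => intro a; rfl
  | cons x _ ih => intro a; rw [maxOf_cons, maxOf_cons, ih]
  | swap x y l => intro a; rw [maxOf_cons, maxOf_cons, maxOf_cons, maxOf_cons, max_right_comm]
  | trans _ _ ih1 ih2 => intro a; rw [ih1, ih2]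

-- ---- generic fold/list helpers ----

theorem foldl_congr_fun {α β : Type} (l : List α) (f g : β → α → β) (a : β)
    (h : ∀ b x, x ∈ l → f b x = g b x) : l.foldl f a = l.foldl g a := by
  induction l generalizing a with
  | nil => rfl
  | cons x r ih => simp only [List.foldl_cons, h a x (by simp)]; exact ih _ (fun b y hy => h b y (by simp [hy]))

theorem getD_map_range {β : Type} [Inhabited β] (f : Nat → β) (n i : Nat) (hi : i < n) (d : β) :
    (((List.range n).map f).getD i d) = f i := by
  rw [List.getD_eq_getElem?_getD, List.getElem?_map, List.getElem?_range hi]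
  rfl


-- ---- the element below a survivor is its nearest strictly-smaller neighbour ----

theorem below_head_aux (arr : List Int) (i p : Nat) (hip : p < i) (hs : survB arr i p = true) :
    ∀ p', p' ≤ p → (∀ k, p' ≤ k → k < p → pvGet arr p ≤ pvGet arr k) →
      ((List.range p').filter (survB arr i)).getLast? = lastLt arr (pvGet arr p) p' := by
  intro p'
  induction p' with
  | zero => intro _ _; simp [lastLt]
  | succ p' ih =>
      intro hp' hall
      rw [List.range_succ, List.filter_append, List.getLast?_append]
      by_cases hlt : pvGet arr p' < pvGet arr p
      · have hsurv : survB arr i p' = true := by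
          rw [surv_iff]; intro k h1 h2
          by_cases hk : k < p
          · exact lt_of_lt_of_le hlt (hall k (by omega) hk)
          · by_cases hk2 : k = p
            · subst hk2; exact hlt
            · exact lt_trans hlt ((surv_iff arr i p).1 hs k (by omega) h2)
        rw [List.filter_cons_of_pos hsurv, lastLt, if_pos hlt]
        simp
      · have hsurv : survB arr i p' = false := by
          rw [Bool.eq_false_iff]; intro h
          exact hlt ((surv_iff arr i p').1 h p (by omega) hip)
        rw [List.filter_cons_of_neg (by simp [hsurv]), lastLt, if_neg hlt]
        simp only [List.filter_nil, List.getLast?_nil, Option.none_or]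
        exact ih (by omega) (fun k h1 h2 => by
          by_cases hk : k = p'
          · subst hk; omega
          · exact hall k (by omega) h2)

theorem below_head (arr : List Int) (i p : Nat) (hip : p < i) (hs : survB arr i p = true) :
    (((List.range p).filter (survB arr i)).reverse).head? = LbSpec arr p := by
  rw [List.head?_reverse]
  exact below_head_aux arr i p hip hs p (le_refl p) (fun k h1 h2 => absurd h2 (by omega))

-- ---- popGE on the survivor stack is a filter ----

theorem popGE_filter (arr : List Int) (v : Int) (t : Nat) :
    ∀ m, m ≤ t → popGE arr v (((List.range m).filter (survB arr t)).reverse)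
        = ((List.range m).filter (fun j => survB arr t j && decide (pvGet arr j < v))).reverse := by
  intro m
  induction m with
  | zero => intro _; simp [popGE]
  | succ m ih =>
      intro hm
      rw [List.range_succ, List.filter_append, List.filter_append, List.reverse_append,
        List.reverse_append]
      by_cases hsurv : survB arr t m = true
      · by_cases hge : v ≤ pvGet arr m
        · have hd : (survB arr t m && decide (pvGet arr m < v)) = false := by
            simp [hsurv]; omega
          rw [List.filter_cons_of_pos hsurv, List.filter_cons_of_neg (by simp [hd])]
          simp only [List.filter_nil, List.reverse_cons, List.reverse_nil, List.nil_append,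
            List.append_nil]
          show popGE arr v (m :: _) = _
          rw [popGE, if_pos hge]
          exact ih (by omega)
        · have hd : (survB arr t m && decide (pvGet arr m < v)) = true := by
            simp [hsurv]; omega
          rw [List.filter_cons_of_pos hsurv, List.filter_cons_of_pos (by simp [hd])]
          simp only [List.filter_nil, List.reverse_cons, List.reverse_nil, List.nil_append]
          show popGE arr v (m :: _) = _
          rw [popGE, if_neg hge]
          have hcong : (List.range m).filter (survB arr t)
              = (List.range m).filter (fun j => survB arr t j && decide (pvGet arr j < v)) := by
            apply List.filter_congr
            intro j hj
            rw [List.mem_range] at hj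
            by_cases hsj : survB arr t j = true
            · have h1 : pvGet arr j < pvGet arr m :=
                (surv_iff arr t j).1 hsj m hj (by omega)
              have h2 : decide (pvGet arr j < v) = true := by simp; omega
              simp [hsj, h2]
            · simp [Bool.eq_false_iff.2 hsj]
          rw [hcong]
          simp
      · have hsurv' : survB arr t m = false := Bool.eq_false_iff.2 hsurv
        rw [List.filter_cons_of_neg (by simp [hsurv']), List.filter_cons_of_neg (by simp [hsurv'])]
        simp only [List.filter_nil, List.reverse_nil, List.nil_append]
        exact ih (by omega)

-- ---- popGT on the right-to-left survivor stack is a filter ----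

theorem popGT_filter (arr : List Int) (v : Int) (t : Nat) :
    ∀ (fuel j : Nat), t ≤ j →
      popGT arr v ((List.range' j fuel).filter (survRB arr t))
        = (List.range' j fuel).filter (fun k => survRB arr t k && decide (pvGet arr k ≤ v)) := by
  intro fuel
  induction fuel with
  | zero => intro j _; simp [popGT]
  | succ fuel ih =>
      intro j hj
      rw [List.range'_succ]
      by_cases hs : survRB arr t j = true
      · by_cases hgt : v < pvGet arr j
        · have hd : (survRB arr t j && decide (pvGet arr j ≤ v)) = false := by
            simp [hs]; omega
          rw [List.filter_cons_of_pos hs, List.filter_cons_of_neg (by simp [hd])]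
          rw [popGT, if_pos hgt]
          exact ih (j+1) (by omega)
        · have hd : (survRB arr t j && decide (pvGet arr j ≤ v)) = true := by
            simp [hs]; omega
          rw [List.filter_cons_of_pos hs, List.filter_cons_of_pos (by simp [hd])]
          rw [popGT, if_neg hgt]
          congr 1
          apply List.filter_congr
          intro k hk
          rw [List.mem_range'_1] at hk
          by_cases hsk : survRB arr t k = true
          · have h1 : pvGet arr k ≤ pvGet arr j :=
              (survR_iff arr t k).1 hsk j hj (by omega)
            have h2 : decide (pvGet arr k ≤ v) = true := by simp; omega
            simp [hsk, h2]
          · simp [Bool.eq_false_iff.2 hsk]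
      · have hs' : survRB arr t j = false := Bool.eq_false_iff.2 hs
        rw [List.filter_cons_of_neg (by simp [hs']), List.filter_cons_of_neg (by simp [hs'])]
        exact ih (j+1) (by omega)

-- ---- the head of the right stack after popping is RbAux ----

theorem rb_head (arr : List Int) (p : Nat) :
    ∀ (fuel j : Nat), p < j → (∀ k, p < k → k < j → pvGet arr p < pvGet arr k) →
      (match ((List.range' j fuel).filter (survRB arr p)) with
       | [] => ((j + fuel : Nat) : Int)
       | q :: _ => (q : Int)) = (RbAux arr (pvGet arr p) j fuel : Int) := by
  intro fuel
  induction fuel with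
  | zero => intro j _ _; simp [RbAux]
  | succ fuel ih =>
      intro j hpj hall
      rw [List.range'_succ]
      by_cases hs : survRB arr p j = true
      · have hle : pvGet arr j ≤ pvGet arr p :=
          (survR_iff arr p j).1 hs p (le_refl p) hpj
        rw [List.filter_cons_of_pos hs, RbAux, if_pos hle]
      · have hgt : pvGet arr p < pvGet arr j := by
          by_contra h
          push_neg at h
          apply hs
          rw [survR_iff]
          intro k hk1 hk2
          by_cases hkp : k = p
          · subst hkp; exact h
          · exact le_of_lt (lt_of_le_of_lt h (hall k (by omega) hk2))
        rw [List.filter_cons_of_neg (by simp [Bool.eq_false_iff.2 hs]), RbAux, if_neg (by omega)]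
        have := ih (j+1) (by omega) (fun k h1 h2 => by
          by_cases hk : k = j
          · subst hk; exact hgt
          · exact hall k h1 (by omega))
        rw [show j + (fuel+1) = (j+1) + fuel by omega]
        exact this


-- ---- prefix-sum list equalities ----

theorem preSumB_aux :
    ∀ (l acc : List Int) (s : Int),
      (l.foldl (fun (p : List Int × Int) x => (p.1 ++ [p.2 + x], p.2 + x)) (acc, s)).1
        = acc ++ psList s l := by
  intro l
  induction l with
  | nil => intro acc s; simp [psList]
  | cons x r ih =>
      intro acc s
      simp only [List.foldl_cons]
      rw [ih]
      simp [psList]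

theorem preSumB_eq (arr : List Int) : preSumB arr = psList 0 arr := by
  unfold preSumB; rw [preSumB_aux]; simp

theorem preSumA_aux :
    ∀ (l ps : List Int) (s : Int), ps.getLastD 0 = s →
      (l.foldl (fun ps num => ps ++ [ps.getLastD 0 + num]) ps) = ps ++ psList s l := by
  intro l
  induction l with
  | nil => intro ps s _; simp [psList]
  | cons x r ih =>
      intro ps s hlast
      simp only [List.foldl_cons, hlast]
      rw [ih (ps ++ [s + x]) (s + x) (by
        rw [List.getLastD_eq_getLast?, List.getLast?_concat]; rfl)]
      simp [psList]

theorem preSumA_eq (arr : List Int) (h : arr ≠ []) : preSumA arr = psList 0 arr := by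
  cases arr with
  | nil => exact absurd rfl h
  | cons x r =>
      show (r.foldl (fun ps num => ps ++ [ps.getLastD 0 + num]) [x]) = _
      rw [preSumA_aux r [x] x (by rfl)]
      simp [psList]

-- ---- boundary values (per-index form of the two stack passes) ----

def leftVal (arr : List Int) (i : Nat) : Int :=
  match LbSpec arr i with
  | none => -1
  | some j => (j : Int)

def rightVal (arr : List Int) (i : Nat) : Int := (RbSpec arr i : Int)

theorem stack_pred (arr : List Int) (m : Nat) :
    (List.range m).filter (fun j => survB arr m j && decide (pvGet arr j < pvGet arr m))
      = (List.range m).filter (survB arr (m+1)) := by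
  apply List.filter_congr
  intro j hj
  rw [List.mem_range] at hj
  rw [Bool.eq_iff_iff]
  simp only [Bool.and_eq_true, decide_eq_true_eq]
  exact ⟨fun ⟨h1, h2⟩ => (surv_succ arr m j hj).2 ⟨h1, h2⟩, fun h => (surv_succ arr m j hj).1 h⟩

theorem rstack_pred (arr : List Int) (m fuel : Nat) :
    (List.range' (m+1) fuel).filter (fun k => survRB arr (m+1) k && decide (pvGet arr k ≤ pvGet arr m))
      = (List.range' (m+1) fuel).filter (survRB arr m) := by
  apply List.filter_congr
  intro k hk
  rw [List.mem_range'_1] at hk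
  rw [Bool.eq_iff_iff]
  simp only [Bool.and_eq_true, decide_eq_true_eq]
  exact ⟨fun ⟨h1, h2⟩ => (survR_succ arr m k (by omega)).2 ⟨h1, h2⟩,
    fun h => (survR_succ arr m k (by omega)).1 h⟩

theorem stkSpec_succ (arr : List Int) (m : Nat) :
    stkSpec arr (m+1) = m :: ((List.range m).filter (survB arr (m+1))).reverse := by
  unfold stkSpec
  rw [List.range_succ, List.filter_append, List.filter_cons_of_pos (surv_self arr m),
    List.filter_nil, List.reverse_append]
  rfl

-- ---- the lefts pass produces leftVal and the survivor stack ----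

theorem leftsB_aux (arr : List Int) :
    ∀ m, m ≤ arr.length →
      ((List.range m).foldl (fun (p : List Int × List Nat) i =>
        let st := popGE arr (pvGet arr i) p.2
        (p.1 ++ [match st with | [] => (-1 : Int) | j :: _ => (j : Int)], i :: st)) ([], []))
      = ((List.range m).map (leftVal arr), stkSpec arr m) := by
  intro m
  induction m with
  | zero => intro _; simp [stkSpec]
  | succ m ih =>
      intro hm
      rw [List.range_succ, List.foldl_append, ih (by omega)]
      simp only [List.foldl_cons, List.foldl_nil]
      have hpop : popGE arr (pvGet arr m) (stkSpec arr m)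
          = ((List.range m).filter (survB arr (m+1))).reverse := by
        unfold stkSpec
        rw [popGE_filter arr (pvGet arr m) m m (le_refl m), stack_pred]
      have hhead : (((List.range m).filter (survB arr (m+1))).reverse).head? = LbSpec arr m :=
        below_head arr (m+1) m (by omega) (surv_self arr m)
      rw [hpop]
      have hentry : (match ((List.range m).filter (survB arr (m+1))).reverse with
          | [] => (-1 : Int) | j :: _ => (j : Int)) = leftVal arr m := by
        unfold leftVal
        cases hst : ((List.range m).filter (survB arr (m+1))).reverse with
        | nil => rw [hst] at hhead; simp at hhead; rw [← hhead]
        | cons q rest => rw [hst] at hhead; simp at hhead; rw [← hhead]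
      rw [hentry, stkSpec_succ]
      simp [List.map_append]

theorem leftsB_eq (arr : List Int) :
    leftsB arr arr.length = (List.range arr.length).map (leftVal arr) := by
  unfold leftsB
  rw [leftsB_aux arr arr.length (le_refl _)]

-- ---- the rights pass produces rightVal and the right survivor stack ----

theorem rightsB_aux (arr : List Int) :
    ∀ k, k ≤ arr.length →
      (((List.range' (arr.length - k) k).reverse).foldl (fun (p : List Int × List Nat) i =>
        let st := popGT arr (pvGet arr i) p.2
        (p.1 ++ [match st with | [] => ((arr.length : Nat) : Int) | j :: _ => (j : Int)], i :: st))
        ([], []))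
      = ((((List.range' (arr.length - k) k).map (rightVal arr)).reverse),
         (List.range' (arr.length - k) k).filter (survRB arr (arr.length - k))) := by
  intro k
  induction k with
  | zero => intro _; simp
  | succ k ih =>
      intro hk
      set m := arr.length - (k+1) with hmdef
      have hm : arr.length - k = m + 1 := by omega
      have IH := ih (by omega)
      rw [hm] at IH
      rw [List.range'_succ, List.reverse_cons, List.foldl_append, IH]
      simp only [List.foldl_cons, List.foldl_nil]
      have hfuel : arr.length - (m+1) = k := by omega
      have hpop : popGT arr (pvGet arr m)
            ((List.range' (m+1) k).filter (survRB arr (m+1)))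
          = (List.range' (m+1) k).filter (survRB arr m) := by
        rw [popGT_filter arr (pvGet arr m) (m+1) k (m+1) (le_refl _), rstack_pred]
      have hentry : (match (List.range' (m+1) k).filter (survRB arr m) with
          | [] => ((arr.length : Nat) : Int) | j :: _ => (j : Int)) = rightVal arr m := by
        have hrb := rb_head arr m k (m+1) (by omega) (fun _ h1 h2 => absurd h1 (by omega))
        unfold rightVal RbSpec
        rw [hfuel]
        rw [show (arr.length : Nat) = (m+1) + k by omega]
        exact hrb
      have hstk : m :: (List.range' (m+1) k).filter (survRB arr m)
          = (List.range' m (k+1)).filter (survRB arr m) := by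
        rw [List.range'_succ, List.filter_cons_of_pos (survR_self arr m)]
      rw [hpop, hentry, hstk, List.range'_succ, List.map_cons, List.reverse_cons]

theorem rightsB_eq (arr : List Int) :
    rightsB arr arr.length = (List.range arr.length).map (rightVal arr) := by
  unfold rightsB
  have h := rightsB_aux arr arr.length (le_refl _)
  rw [Nat.sub_self] at h
  rw [List.range_eq_range']
  rw [h]
  simp [← List.range_eq_range']


-- ---- B equals the canonical fold of fI over all indices ----

theorem altB_eq (arr : List Int) : sub_max_alt arr = maxOf arr 0 (List.range arr.length) := by
  simp only [sub_max_alt]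
  rw [preSumB_eq, leftsB_eq, rightsB_eq]
  unfold maxOf
  apply foldl_congr_fun
  intro b i hi
  rw [List.mem_range] at hi
  rw [getD_map_range _ _ _ hi, getD_map_range _ _ _ hi]
  have hb := rbSpec_bounds arr i hi
  have h1 : ((rightVal arr i) - 1).toNat = RbSpec arr i - 1 := by
    unfold rightVal; omega
  rw [h1, psList_getD arr arr 0 (RbSpec arr i - 1) (by omega)]
  rw [show RbSpec arr i - 1 + 1 = RbSpec arr i by omega]
  unfold fI
  cases hL : LbSpec arr i with
  | none =>
      unfold leftVal
      rw [hL]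
      norm_num
  | some j =>
      have hj := lastLt_lt arr (pvGet arr i) i j hL
      unfold leftVal
      rw [hL]
      rw [if_pos (by omega : (0:Int) ≤ (j:Int))]
      rw [show ((j : Int)).toNat = j by omega]
      rw [psList_getD arr arr 0 j (by omega)]
      norm_num

-- ---- predicate conversions between survivorship and RbSpec ----

theorem chunk_pred (arr : List Int) (m : Nat) (hm : m < arr.length) :
    (List.range m).filter (fun p => survB arr m p && decide (pvGet arr m ≤ pvGet arr p))
      = (List.range m).filter (fun p => decide (RbSpec arr p = m)) := by
  apply List.filter_congr
  intro p hp
  rw [List.mem_range] at hp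
  rw [Bool.eq_iff_iff]
  simp only [Bool.and_eq_true, decide_eq_true_eq]
  constructor
  · rintro ⟨h1, h2⟩; exact rb_of_surv arr p m hp hm h1 h2
  · intro h
    have := surv_of_rb arr p m hp (by omega) h
    exact ⟨this.1, this.2 hm⟩

theorem tail_pred (arr : List Int) :
    (List.range arr.length).filter (survB arr arr.length)
      = (List.range arr.length).filter (fun p => decide (RbSpec arr p = arr.length)) := by
  apply List.filter_congr
  intro p hp
  rw [List.mem_range] at hp
  rw [Bool.eq_iff_iff]
  simp only [decide_eq_true_eq]
  constructor
  · intro h; exact rb_of_surv_n arr p hp h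
  · intro h; exact (surv_of_rb arr p arr.length hp (le_refl _) h).1

theorem filter_lt_split (arr : List Int) (m : Nat) (hm : m < arr.length) :
    ((List.range m).filter (fun p => decide (RbSpec arr p < m))
      ++ (List.range m).filter (fun p => decide (RbSpec arr p = m))).Perm
      ((List.range (m+1)).filter (fun p => decide (RbSpec arr p < m+1))) := by
  have hb := rbSpec_bounds arr m hm
  have h1 : (List.range (m+1)).filter (fun p => decide (RbSpec arr p < m+1))
      = (List.range m).filter (fun p => decide (RbSpec arr p < m+1)) := by
    rw [List.range_succ, List.filter_append,
      List.filter_cons_of_neg (by simp; omega), List.filter_nil, List.append_nil]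
  rw [h1]
  have h2 := List.filter_append_perm (fun p => decide (RbSpec arr p < m))
    ((List.range m).filter (fun p => decide (RbSpec arr p < m+1)))
  rw [List.filter_filter, List.filter_filter] at h2
  have e1 : (List.range m).filter (fun a => decide (RbSpec arr a < m) && decide (RbSpec arr a < m+1))
      = (List.range m).filter (fun p => decide (RbSpec arr p < m)) := by
    apply List.filter_congr
    intro p _
    rw [Bool.eq_iff_iff]
    simp only [Bool.and_eq_true, decide_eq_true_eq]
    omega
  have e2 : (List.range m).filter (fun a => !decide (RbSpec arr a < m) && decide (RbSpec arr a < m+1))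
      = (List.range m).filter (fun p => decide (RbSpec arr p = m)) := by
    apply List.filter_congr
    intro p _
    rw [Bool.eq_iff_iff]
    simp only [Bool.and_eq_true, Bool.not_eq_eq_eq_not, Bool.not_true, decide_eq_true_eq,
      decide_eq_false_iff_not]
    omega
  rw [e1, e2] at h2
  exact h2

theorem filter_n_split (arr : List Int) :
    ((List.range arr.length).filter (fun p => decide (RbSpec arr p < arr.length))
      ++ (List.range arr.length).filter (fun p => decide (RbSpec arr p = arr.length))).Perm
      (List.range arr.length) := by
  have h2 := List.filter_append_perm (fun p => decide (RbSpec arr p < arr.length))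
    (List.range arr.length)
  have e2 : (List.range arr.length).filter (fun a => !decide (RbSpec arr a < arr.length))
      = (List.range arr.length).filter (fun p => decide (RbSpec arr p = arr.length)) := by
    apply List.filter_congr
    intro p hp
    rw [List.mem_range] at hp
    have hb := rbSpec_bounds arr p hp
    rw [Bool.eq_iff_iff]
    simp only [Bool.not_eq_eq_eq_not, Bool.not_true, decide_eq_true_eq, decide_eq_false_iff_not]
    omega
  rw [e2] at h2
  exact h2


-- ---- A's inner while loop on the survivor stack ----

theorem popA_spec (arr : List Int) (i : Nat) (hi : i < arr.length) :
    ∀ m, m ≤ i → ∀ ans,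
      popStepA arr (psList 0 arr) i (pvGet arr i) ans (((List.range m).filter (survB arr i)).reverse)
        = (maxOf arr ans (((List.range m).filter
              (fun p => survB arr i p && decide (pvGet arr i ≤ pvGet arr p))).reverse),
           ((List.range m).filter
              (fun p => survB arr i p && decide (pvGet arr p < pvGet arr i))).reverse) := by
  intro m
  induction m with
  | zero => intro _ ans; simp [popStepA, maxOf]
  | succ m ih =>
      intro hm ans
      rw [List.range_succ, List.filter_append, List.filter_append, List.filter_append,
        List.reverse_append, List.reverse_append, List.reverse_append]
      by_cases hsurv : survB arr i m = true
      · rw [List.filter_cons_of_pos hsurv]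
        by_cases hge : pvGet arr i ≤ pvGet arr m
        · have hc : (survB arr i m && decide (pvGet arr i ≤ pvGet arr m)) = true := by
            simp [hsurv, hge]
          have hk : (survB arr i m && decide (pvGet arr m < pvGet arr i)) = false := by
            simp [hsurv]; omega
          rw [List.filter_cons_of_pos (by simp [hc]), List.filter_cons_of_neg (by simp [hk])]
          simp only [List.filter_nil, List.reverse_cons, List.reverse_nil, List.nil_append,
            List.append_nil]
          have hrb : RbSpec arr m = i := rb_of_surv arr m i (by omega) hi hsurv hge
          have hhead : (((List.range m).filter (survB arr i)).reverse).head? = LbSpec arr m :=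
            below_head arr i m (by omega) hsurv
          show popStepA arr (psList 0 arr) i (pvGet arr i) ans
              (m :: ((List.range m).filter (survB arr i)).reverse) = _
          rw [popStepA, if_pos hge]
          have hsub : (match ((List.range m).filter (survB arr i)).reverse with
              | [] => (psList 0 arr).getD (i-1) 0
              | j :: _ => (psList 0 arr).getD (i-1) 0 - (psList 0 arr).getD j 0)
                * pvGet arr m = fI arr m := by
            have hpre : (psList 0 arr).getD (i-1) 0 = S arr (RbSpec arr m) := by
              rw [psList_getD arr arr 0 (i-1) (by omega),
                show i - 1 + 1 = i by omega, hrb]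
              norm_num
            unfold fI
            cases hrest : ((List.range m).filter (survB arr i)).reverse with
            | nil =>
                rw [hrest] at hhead
                simp only [List.head?_nil] at hhead
                rw [← hhead, hpre, hrb]
                norm_num
            | cons j rest' =>
                rw [hrest] at hhead
                simp only [List.head?_cons] at hhead
                have hj := lastLt_lt arr (pvGet arr m) m j hhead.symm
                rw [← hhead, hpre, hrb]
                simp only []
                rw [psList_getD arr arr 0 j (by omega)]
                norm_num
          simp only [hsub]
          rw [ih (by omega) (max ans (fI arr m))]
          rw [List.singleton_append, maxOf_cons]
        · have hc : (survB arr i m && decide (pvGet arr i ≤ pvGet arr m)) = false := by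
            simp [hsurv]; omega
          have hk : (survB arr i m && decide (pvGet arr m < pvGet arr i)) = true := by
            simp [hsurv]; omega
          rw [List.filter_cons_of_neg (by simp [hc]), List.filter_cons_of_pos (by simp [hk])]
          simp only [List.filter_nil, List.reverse_cons, List.reverse_nil, List.nil_append,
            List.append_nil]
          show popStepA arr (psList 0 arr) i (pvGet arr i) ans
              (m :: ((List.range m).filter (survB arr i)).reverse) = _
          rw [popStepA, if_neg hge]
          have hchunk : (List.range m).filter
              (fun p => survB arr i p && decide (pvGet arr i ≤ pvGet arr p)) = [] := by
            rw [List.filter_eq_nil_iff]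
            intro p hp
            rw [List.mem_range] at hp
            simp only [Bool.and_eq_true, decide_eq_true_eq, not_and]
            intro hsp
            have h1 : pvGet arr p < pvGet arr m := (surv_iff arr i p).1 hsp m hp (by omega)
            omega
          have hkeep : (List.range m).filter
              (fun p => survB arr i p && decide (pvGet arr p < pvGet arr i))
              = (List.range m).filter (survB arr i) := by
            apply List.filter_congr
            intro p hp
            rw [List.mem_range] at hp
            by_cases hsp : survB arr i p = true
            · have h1 : pvGet arr p < pvGet arr m := (surv_iff arr i p).1 hsp m hp (by omega)
              have h2 : decide (pvGet arr p < pvGet arr i) = true := by simp; omega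
              simp [hsp, h2]
            · simp [Bool.eq_false_iff.2 hsp]
          rw [hchunk, hkeep]
          simp [maxOf]
      · have hsurv' : survB arr i m = false := Bool.eq_false_iff.2 hsurv
        rw [List.filter_cons_of_neg (by simp [hsurv']), List.filter_cons_of_neg (by simp [hsurv']),
          List.filter_cons_of_neg (by simp [hsurv'])]
        simp only [List.filter_nil, List.reverse_nil, List.nil_append]
        exact ih (by omega) ans

-- ---- A's trailing while loop ----

theorem finishA_spec (arr : List Int) :
    ∀ m, m ≤ arr.length → ∀ ans,
      finishA arr (psList 0 arr) arr.length ans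
          (((List.range m).filter (survB arr arr.length)).reverse)
        = maxOf arr ans (((List.range m).filter (survB arr arr.length)).reverse) := by
  intro m
  induction m with
  | zero => intro _ ans; simp [finishA, maxOf]
  | succ m ih =>
      intro hm ans
      rw [List.range_succ, List.filter_append]
      by_cases hsurv : survB arr arr.length m = true
      · rw [List.filter_cons_of_pos hsurv]
        simp only [List.filter_nil, List.reverse_append, List.reverse_cons, List.reverse_nil,
          List.nil_append]
        have hrb : RbSpec arr m = arr.length := rb_of_surv_n arr m (by omega) hsurv
        have hhead : (((List.range m).filter (survB arr arr.length)).reverse).head?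
            = LbSpec arr m := below_head arr arr.length m (by omega) hsurv
        show finishA arr (psList 0 arr) arr.length ans
            (m :: ((List.range m).filter (survB arr arr.length)).reverse) = _
        have hsub : (match ((List.range m).filter (survB arr arr.length)).reverse with
            | [] => (psList 0 arr).getD (arr.length-1) 0
            | j :: _ => (psList 0 arr).getD (arr.length-1) 0 - (psList 0 arr).getD j 0)
              * pvGet arr m = fI arr m := by
          have hpre : (psList 0 arr).getD (arr.length-1) 0 = S arr (RbSpec arr m) := by
            rw [psList_getD arr arr 0 (arr.length-1) (by omega),
              show arr.length - 1 + 1 = arr.length by omega, hrb]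
            norm_num
          unfold fI
          cases hrest : ((List.range m).filter (survB arr arr.length)).reverse with
          | nil =>
              rw [hrest] at hhead
              simp only [List.head?_nil] at hhead
              rw [← hhead, hpre, hrb]
              norm_num
          | cons j rest' =>
              rw [hrest] at hhead
              simp only [List.head?_cons] at hhead
              have hj := lastLt_lt arr (pvGet arr m) m j hhead.symm
              rw [← hhead, hpre, hrb]
              simp only []
              rw [psList_getD arr arr 0 j (by omega)]
              norm_num
        rw [finishA.eq_def]
        simp only [hsub]
        rw [ih (by omega) (max ans (fI arr m))]
        rw [List.singleton_append, maxOf_cons]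
      · rw [List.filter_cons_of_neg (by simp [Bool.eq_false_iff.2 hsurv])]
        simp only [List.filter_nil, List.reverse_append, List.reverse_nil, List.nil_append]
        exact ih (by omega) ans


-- ---- A's main loop invariant ----

theorem mainA (arr : List Int) (hne : arr ≠ []) :
    ∀ m, m ≤ arr.length →
      ((List.range m).foldl (fun (st : Int × List Nat) i =>
        let r := popStepA arr (preSumA arr) i (pvGet arr i) st.1 st.2
        (r.1, i :: r.2)) ((0 : Int), ([] : List Nat)))
      = (maxOf arr 0 ((List.range m).filter (fun p => decide (RbSpec arr p < m))),
         stkSpec arr m) := by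
  rw [preSumA_eq arr hne]
  intro m
  induction m with
  | zero => intro _; simp [stkSpec, maxOf]
  | succ m ih =>
      intro hm
      have hstk2 : ((List.range (m+1)).filter (survB arr (m+1))).reverse
          = m :: ((List.range m).filter
              (fun p => survB arr m p && decide (pvGet arr p < pvGet arr m))).reverse := by
        rw [List.range_succ, List.filter_append, List.filter_cons_of_pos (surv_self arr m),
          List.filter_nil, List.reverse_append, List.reverse_cons, List.reverse_nil,
          List.nil_append, List.singleton_append, stack_pred]
      have hans : maxOf arr 0 ((List.range (m+1)).filter (fun p => decide (RbSpec arr p < m+1)))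
          = maxOf arr (maxOf arr 0 ((List.range m).filter (fun p => decide (RbSpec arr p < m))))
              (((List.range m).filter
                (fun p => survB arr m p && decide (pvGet arr m ≤ pvGet arr p))).reverse) :=
        calc maxOf arr 0 ((List.range (m+1)).filter (fun p => decide (RbSpec arr p < m+1)))
            = maxOf arr 0 ((List.range m).filter (fun p => decide (RbSpec arr p < m))
                ++ (List.range m).filter (fun p => decide (RbSpec arr p = m))) :=
              (maxOf_perm arr (filter_lt_split arr m (by omega)) 0).symm
          _ = maxOf arr (maxOf arr 0 ((List.range m).filter (fun p => decide (RbSpec arr p < m))))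
                ((List.range m).filter (fun p => decide (RbSpec arr p = m))) :=
              maxOf_append arr 0 _ _
          _ = maxOf arr (maxOf arr 0 ((List.range m).filter (fun p => decide (RbSpec arr p < m))))
                ((List.range m).filter
                  (fun p => survB arr m p && decide (pvGet arr m ≤ pvGet arr p))) := by
              rw [chunk_pred arr m (by omega)]
          _ = maxOf arr (maxOf arr 0 ((List.range m).filter (fun p => decide (RbSpec arr p < m))))
                (((List.range m).filter
                  (fun p => survB arr m p && decide (pvGet arr m ≤ pvGet arr p))).reverse) :=
              (maxOf_perm arr (List.reverse_perm _) _).symm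
      conv_lhs => rw [List.range_succ]
      rw [List.foldl_append, ih (by omega)]
      simp only [List.foldl_cons, List.foldl_nil]
      unfold stkSpec
      rw [popA_spec arr m (by omega) m (le_refl m)]
      rw [hans, hstk2]

theorem A_eq (arr : List Int) (hne : arr ≠ []) :
    sub_max arr = maxOf arr 0 (List.range arr.length) := by
  simp only [sub_max]
  rw [mainA arr hne arr.length (le_refl _)]
  rw [preSumA_eq arr hne]
  show finishA arr (psList 0 arr) arr.length _ (stkSpec arr arr.length) = _
  unfold stkSpec
  rw [finishA_spec arr arr.length (le_refl _)]
  rw [maxOf_perm arr (List.reverse_perm _), tail_pred, ← maxOf_append]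
  exact maxOf_perm arr (filter_n_split arr) 0

-- ===== VERDICT (by name: the statement is the Claim_ definition above) =====
theorem sub_max_spec : Claim_equal_sub_max := by
  intro arr _ hpre
  unfold Spec_sub_max
  rw [A_eq arr hpre, altB_eq arr]
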